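-- pv_equiv track=rewrite | github.com/Groovy52/Data-Structure-and-Algorithm | Data-structure/CP02_Linear-Structure/CP02-01_List/CP02-01-01_Array/Single update of a 2D array.py | solution
-- ===== SOURCE A (Python) =====
-- def solution(n, A, i1, j1, i2, j2, k):
--     for i in range(i1, i2+1):
--         for j in range(j1, j2+1):
--             A[i][j] *= k
--
--     ans = 0
--     for a in A:
--         ans += sum(a)
--     return ans
-- ===== SOURCE B (Python) =====
-- def solution(n, A, i1, j1, i2, j2, k):
--     # one base-sum pass, then a single fused pass over the submatrix that
--     # accumulates the touched values while scaling them in place;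
--     # final sum = base + delta*(k-1) since each visit changes the cell by (k-1)*current.
--     total = sum(map(sum, A))
--     delta = 0
--     for i in range(i1, i2 + 1):
--         for j in range(j1, j2 + 1):
--             delta += A[i][j]
--             A[i][j] *= k
--     return total + delta * (k - 1)
-- ===== Notes on version B (the rewrite author's own statement) =====
-- stated objective: alternative
-- what changed: B computes the base sum first and then makes one fused pass over the submatrix, accumulating a delta and scaling cells in place, returning base + delta*(k-1) instead of mutating and then re-summing the whole array.
import Mathlib
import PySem

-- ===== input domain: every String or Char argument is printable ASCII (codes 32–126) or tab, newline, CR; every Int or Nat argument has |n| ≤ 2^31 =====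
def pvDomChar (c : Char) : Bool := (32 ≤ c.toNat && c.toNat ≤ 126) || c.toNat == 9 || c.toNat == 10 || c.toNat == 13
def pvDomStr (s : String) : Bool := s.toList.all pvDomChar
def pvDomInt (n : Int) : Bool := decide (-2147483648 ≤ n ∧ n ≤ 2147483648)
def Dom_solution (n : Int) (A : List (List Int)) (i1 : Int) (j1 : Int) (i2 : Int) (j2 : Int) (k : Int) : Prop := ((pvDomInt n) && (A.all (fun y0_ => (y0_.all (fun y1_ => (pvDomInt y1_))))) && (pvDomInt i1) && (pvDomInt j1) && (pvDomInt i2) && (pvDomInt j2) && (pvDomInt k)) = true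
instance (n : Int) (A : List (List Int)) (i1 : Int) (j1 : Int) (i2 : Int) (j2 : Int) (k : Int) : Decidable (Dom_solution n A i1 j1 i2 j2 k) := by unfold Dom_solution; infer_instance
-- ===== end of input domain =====

-- ===== PORT A =====
-- B changes only the decomposition (delta identity instead of mutate-then-rescan); equivalence is about
-- the return value (Python A mutates A in place; Python B performs the same in-place mutation).
-- shared by both ports: the Python statement `A[i][j] *= k` on the current matrix
def mulCell (k : Int) (M : List (List Int)) (i j : Int) : List (List Int) :=
  match PySem.List.pyGet? M i with
  | none => M
  | some row => PySem.List.pySetD M i (PySem.List.pySetD row j (PySem.List.pyGetD row j 0 * k))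

def solution (n : Int) (A : List (List Int)) (i1 : Int) (j1 : Int) (i2 : Int) (j2 : Int) (k : Int) : Int :=
  let M := (PySem.List.pyRange i1 (i2+1) 1).foldl
      (fun M i => (PySem.List.pyRange j1 (j2+1) 1).foldl (fun M j => mulCell k M i j) M) A
  M.foldl (fun ans a => ans + a.sum) 0

-- ===== PORT B =====
-- the Python expression `A[i][j]` on the current matrix
def readCell (M : List (List Int)) (i j : Int) : Int :=
  PySem.List.pyGetD (PySem.List.pyGetD M i []) j 0

def solution_alt (n : Int) (A : List (List Int)) (i1 : Int) (j1 : Int) (i2 : Int) (j2 : Int) (k : Int) : Int :=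
  let total := (A.map List.sum).sum
  let st := (PySem.List.pyRange i1 (i2+1) 1).foldl
      (fun st i => (PySem.List.pyRange j1 (j2+1) 1).foldl
         (fun st j => (mulCell k st.1 i j, st.2 + readCell st.1 i j)) st) (A, (0:Int))
  total + st.2 * (k - 1)

-- ===== PRECONDITION & SPEC =====
-- Pre_ excludes exactly the inputs on which Python A raises IndexError: when both index ranges are
-- nonempty (otherwise no access happens), every row index i1..i2 must be in range for A, and every
-- row that some such index resolves to (directly or by negative-index wraparound) must admit j1..j2.
def Pre_solution (n : Int) (A : List (List Int)) (i1 : Int) (j1 : Int) (i2 : Int) (j2 : Int) (k : Int) : Prop :=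
  i1 ≤ i2 → j1 ≤ j2 →
    (-(A.length : Int) ≤ i1 ∧ i2 < (A.length : Int) ∧
      ∀ pr ∈ A.zipIdx, ((i1 ≤ (pr.2 : Int) ∧ (pr.2 : Int) ≤ i2) ∨
          (i1 ≤ (pr.2 : Int) - (A.length : Int) ∧ (pr.2 : Int) - (A.length : Int) ≤ i2)) →
        -(pr.1.length : Int) ≤ j1 ∧ j2 < (pr.1.length : Int))
instance (n : Int) (A : List (List Int)) (i1 : Int) (j1 : Int) (i2 : Int) (j2 : Int) (k : Int) : Decidable (Pre_solution n A i1 j1 i2 j2 k) := by unfold Pre_solution; infer_instance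

def pvWitness_solution : Int × List (List Int) × Int × Int × Int × Int × Int := (2, [[1,2],[3,4]], 0, 0, 1, 1, 3)

def Spec_solution (n : Int) (A : List (List Int)) (i1 : Int) (j1 : Int) (i2 : Int) (j2 : Int) (k : Int) (out : Int) : Prop := out = solution_alt n A i1 j1 i2 j2 k
instance (n : Int) (A : List (List Int)) (i1 : Int) (j1 : Int) (i2 : Int) (j2 : Int) (k : Int) (out : Int) : Decidable (Spec_solution n A i1 j1 i2 j2 k out) := by unfold Spec_solution; infer_instance

-- ===== CLAIM (what is proved, stated in full; the proofs are below) =====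
def Claim_equal_solution : Prop := ∀ (n : Int) (A : List (List Int)) (i1 : Int) (j1 : Int) (i2 : Int) (j2 : Int) (k : Int), Dom_solution n A i1 j1 i2 j2 k → Pre_solution n A i1 j1 i2 j2 k → Spec_solution n A i1 j1 i2 j2 k (solution n A i1 j1 i2 j2 k)

-- ===== LEMMAS AND PROOFS =====

-- resolving a python index that is in range to a natural position
theorem pyIdx_char {len : Nat} {i : Int} {m : Nat} (h : PySem.List.pyIdx? len i = some m) :
    (0 ≤ i → (m:Int) = i) ∧ (i < 0 → (m:Int) = i + len) := by
  unfold PySem.List.pyIdx? at h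
  split_ifs at h with h1 h2 h3 <;> simp_all <;> omega

theorem pyIdx_of_inRange {len : Nat} {i : Int} (h : PySem.Raise.InRange len i) :
    ∃ m : Nat, PySem.List.pyIdx? len i = some m ∧ m < len := by
  obtain ⟨h1, h2⟩ := h
  unfold PySem.List.pyIdx?
  by_cases hp : 0 ≤ i
  · exact ⟨i.toNat, by simp [hp, h2], by omega⟩
  · refine ⟨len - (-i).toNat, by simp [hp, h1], by omega⟩

theorem pyGetD_of_idx {α : Type} (xs : List α) (i : Int) (m : Nat) (d : α)
    (h : PySem.List.pyIdx? xs.length i = some m) (hm : m < xs.length) :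
    PySem.List.pyGetD xs i d = xs[m] := by
  simp [PySem.List.pyGetD, PySem.List.pyGet?, h, hm]

theorem pySetD_of_idx {α : Type} (xs : List α) (i : Int) (m : Nat) (v : α)
    (h : PySem.List.pyIdx? xs.length i = some m) :
    PySem.List.pySetD xs i v = xs.set m v := by
  simp [PySem.List.pySetD, PySem.List.pySet?, h]

theorem sum_set_int (l : List Int) (n : Nat) (v : Int) (h : n < l.length) :
    (l.set n v).sum = l.sum - l[n] + v := by
  induction l generalizing n with
  | nil => simp at h
  | cons x xs ih =>
    cases n with
    | zero => simp; ring
    | succ m =>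
      simp only [List.set_cons_succ, List.sum_cons, List.getElem_cons_succ]
      rw [ih m (by simpa using h)]; ring

-- shape invariant: same list of row lengths
def SameShape (M M' : List (List Int)) : Prop := M'.map List.length = M.map List.length

theorem sameShape_len {M M' : List (List Int)} (h : SameShape M M') : M'.length = M.length := by
  have := congrArg List.length h; simpa using this

theorem sameShape_row_len {M M' : List (List Int)} (h : SameShape M M') {i : Int}
    (hi : PySem.Raise.InRange M.length i) :
    (PySem.List.pyGetD M' i []).length = (PySem.List.pyGetD M i []).length := by
  obtain ⟨m, hm, hlt⟩ := pyIdx_of_inRange hi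
  have hm' : PySem.List.pyIdx? M'.length i = some m := by rw [sameShape_len h]; exact hm
  have hlt' : m < M'.length := by rw [sameShape_len h]; exact hlt
  rw [pyGetD_of_idx M i m [] hm hlt, pyGetD_of_idx M' i m [] hm' hlt']
  have hc := congrArg (fun l : List Nat => l.getD m 0) h
  simp only [List.getD_eq_getElem _ _ (by simpa using hlt' : m < (M'.map List.length).length),
    List.getD_eq_getElem _ _ (by simpa using hlt : m < (M.map List.length).length)] at hc
  simpa using hc

-- the single-cell key facts (valid indices): shape preserved, sum changes by read*(k-1)
theorem mulCell_key (k i j : Int) (M : List (List Int))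
    (hi : PySem.Raise.InRange M.length i)
    (hj : PySem.Raise.InRange (PySem.List.pyGetD M i []).length j) :
    SameShape M (mulCell k M i j) ∧
    ((mulCell k M i j).map List.sum).sum = (M.map List.sum).sum + readCell M i j * (k - 1) := by
  obtain ⟨m, hm, hmlt⟩ := pyIdx_of_inRange hi
  have hrowD : PySem.List.pyGetD M i [] = M[m] := pyGetD_of_idx M i m [] hm hmlt
  have hrow : PySem.List.pyGet? M i = some M[m] := by
    simp [PySem.List.pyGet?, hm, hmlt]
  rw [hrowD] at hj
  obtain ⟨p, hp, hplt⟩ := pyIdx_of_inRange hj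
  have hvalD : PySem.List.pyGetD M[m] j 0 = M[m][p] := pyGetD_of_idx M[m] j p 0 hp hplt
  have hsetRow : PySem.List.pySetD M[m] j (PySem.List.pyGetD M[m] j 0 * k)
      = M[m].set p (M[m][p] * k) := by rw [hvalD]; exact pySetD_of_idx _ j p _ hp
  have hmc : mulCell k M i j = M.set m (M[m].set p (M[m][p] * k)) := by
    unfold mulCell
    rw [hrow]
    simp only []
    rw [hsetRow, pySetD_of_idx M i m _ hm]
  constructor
  · unfold SameShape
    rw [hmc, List.map_set]
    have : (M[m].set p (M[m][p] * k)).length = M[m].length := by simp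
    rw [this]
    have : (M.map List.length)[m]'(by simpa using hmlt) = M[m].length := by simp
    rw [← this, List.set_getElem_self]
  · rw [hmc, List.map_set]
    rw [sum_set_int _ m _ (by simpa using hmlt)]
    have hg : (M.map List.sum)[m]'(by simpa using hmlt) = M[m].sum := by simp
    rw [hg, sum_set_int _ p _ hplt]
    unfold readCell
    rw [hrowD, hvalD]; ring

-- inner loop invariant (over an arbitrary list of column indices)
theorem inner_inv (k i : Int) (L : List Int) (M : List (List Int)) (d : Int)
    (h : ∀ j ∈ L, PySem.Raise.InRange M.length i ∧
        PySem.Raise.InRange (PySem.List.pyGetD M i []).length j) :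
    let r := L.foldl (fun st j => (mulCell k st.1 i j, st.2 + readCell st.1 i j)) (M, d)
    r.1 = L.foldl (fun M j => mulCell k M i j) M ∧ SameShape M r.1 ∧
      (r.1.map List.sum).sum = (M.map List.sum).sum + (r.2 - d) * (k - 1) := by
  induction L generalizing M d with
  | nil => exact ⟨rfl, rfl, by simp [List.foldl]⟩
  | cons j L ih =>
    obtain ⟨hi, hj⟩ := h j (List.mem_cons_self ..)
    obtain ⟨hsh, hsum⟩ := mulCell_key k i j M hi hj
    have h' : ∀ j' ∈ L, PySem.Raise.InRange (mulCell k M i j).length i ∧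
        PySem.Raise.InRange (PySem.List.pyGetD (mulCell k M i j) i []).length j' := by
      intro j' hj'
      obtain ⟨h1, h2⟩ := h j' (List.mem_cons_of_mem _ hj')
      refine ⟨by rwa [sameShape_len hsh], by rwa [sameShape_row_len hsh hi]⟩
    obtain ⟨e1, e2, e3⟩ := ih (mulCell k M i j) (d + readCell M i j) h'
    simp only [List.foldl_cons]
    refine ⟨e1, ?_, ?_⟩
    · unfold SameShape at *; rw [e2, hsh]
    · rw [e3, hsum]; ring

-- outer loop invariant (over an arbitrary list of row indices)
theorem outer_inv (k : Int) (L1 L2 : List Int) (M : List (List Int)) (d : Int)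
    (h : ∀ i ∈ L1, ∀ j ∈ L2, PySem.Raise.InRange M.length i ∧
        PySem.Raise.InRange (PySem.List.pyGetD M i []).length j) :
    let r := L1.foldl (fun st i => L2.foldl
        (fun st j => (mulCell k st.1 i j, st.2 + readCell st.1 i j)) st) (M, d)
    r.1 = L1.foldl (fun M i => L2.foldl (fun M j => mulCell k M i j) M) M ∧ SameShape M r.1 ∧
      (r.1.map List.sum).sum = (M.map List.sum).sum + (r.2 - d) * (k - 1) := by
  induction L1 generalizing M d with
  | nil => exact ⟨rfl, rfl, by simp [List.foldl]⟩
  | cons i L1 ih =>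
    obtain ⟨e1, e2, e3⟩ := inner_inv k i L2 M d (h i (List.mem_cons_self ..))
    set st1 := L2.foldl (fun st j => (mulCell k st.1 i j, st.2 + readCell st.1 i j)) (M, d) with hst1
    have h' : ∀ i' ∈ L1, ∀ j ∈ L2, PySem.Raise.InRange st1.1.length i' ∧
        PySem.Raise.InRange (PySem.List.pyGetD st1.1 i' []).length j := by
      intro i' hi' j hjj
      obtain ⟨h1, h2⟩ := h i' (List.mem_cons_of_mem _ hi') j hjj
      refine ⟨by rwa [sameShape_len e2], by rwa [sameShape_row_len e2 h1]⟩
    obtain ⟨f1, f2, f3⟩ := ih st1.1 st1.2 h'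
    have hpair : (st1.1, st1.2) = st1 := rfl
    refine ⟨?_, ?_, ?_⟩
    · simp only [List.foldl_cons]
      rw [← hst1, ← hpair]
      rw [f1, e1]
    · simp only [List.foldl_cons]; rw [← hst1, ← hpair]
      unfold SameShape at *
      rw [f2, e2]
    · simp only [List.foldl_cons]; rw [← hst1, ← hpair]
      rw [f3, e3]; ring

-- Pre_ in endpoint form implies the per-access in-range facts the fold invariants need
theorem pre_ranges {n : Int} {A : List (List Int)} {i1 j1 i2 j2 k : Int}
    (h : Pre_solution n A i1 j1 i2 j2 k) :
    ∀ i ∈ PySem.List.pyRange i1 (i2+1) 1, ∀ j ∈ PySem.List.pyRange j1 (j2+1) 1,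
      PySem.Raise.InRange A.length i ∧ PySem.Raise.InRange (PySem.List.pyGetD A i []).length j := by
  intro i hi j hj
  rw [PySem.List.mem_pyRange_one] at hi hj
  obtain ⟨hb1, hb2, hb3⟩ := h (by omega) (by omega)
  have hin : PySem.Raise.InRange A.length i := ⟨by omega, by omega⟩
  refine ⟨hin, ?_⟩
  obtain ⟨m, hm, hlt⟩ := pyIdx_of_inRange hin
  rw [pyGetD_of_idx A i m [] hm hlt]
  have hmem : (A[m], m) ∈ A.zipIdx := by
    have : A.zipIdx[m]'(by simpa using hlt) = (A[m], m) := by simp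
    exact this ▸ List.getElem_mem _
  obtain ⟨hc1, hc2⟩ := pyIdx_char hm
  have htouch : (i1 ≤ (m : Int) ∧ (m : Int) ≤ i2) ∨
      (i1 ≤ (m : Int) - (A.length : Int) ∧ (m : Int) - (A.length : Int) ≤ i2) := by
    by_cases hp : 0 ≤ i
    · left; rw [hc1 hp]; omega
    · right; rw [hc2 (by omega)]; push_cast; constructor <;> omega
  obtain ⟨hr1, hr2⟩ := hb3 (A[m], m) hmem htouch
  simp only at hr1 hr2
  exact ⟨by omega, by omega⟩

theorem foldl_sum (M : List (List Int)) (s : Int) :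
    M.foldl (fun ans a => ans + a.sum) s = s + (M.map List.sum).sum := by
  induction M generalizing s with
  | nil => simp
  | cons a M ih => simp [ih]; ring

-- ===== VERDICT (by name: the statement is the Claim_ definition above) =====
theorem solution_spec : Claim_equal_solution := by
  intro n A i1 j1 i2 j2 k _ hpre
  unfold Spec_solution solution solution_alt
  obtain ⟨e1, _, e3⟩ := outer_inv k (PySem.List.pyRange i1 (i2+1) 1)
      (PySem.List.pyRange j1 (j2+1) 1) A 0 (pre_ranges hpre)
  rw [foldl_sum, e1] at *
  rw [← e1, e3]; ring
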